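-- pv_equiv track=rewrite | github.com/henrytwo/Competitive-Programming | cco14p1.py | get_mask
-- ===== SOURCE A (Python) =====
-- def get_mask(h):
-- 	#return [['#' if x > h - ((2 * y - 1) // 2) and x < h + ((2 * y - 1) // 2) else ' ' for x in range(2 * h - 1)] for y in range(h)]
--
-- 	meh = []
--
-- 	for y in range(1, h + 1):
-- 		tiles = 2 * y - 1
-- 		padding = (2 * h - 1 - tiles) // 2
--
-- 		leh = []
--
-- 		for x in range(1, 2 * h):
-- 			leh.append('#' if padding < x < 2 * h - padding else ' ')
--
-- 		meh.append(leh)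
--
-- 	return meh
-- ===== SOURCE B (Python) =====
-- def get_mask(h):
-- 	# Simpler: compute each row's segment lengths arithmetically instead of testing every cell.
-- 	return [[' '] * (h - y) + ['#'] * (2 * y - 1) + [' '] * (h - y) for y in range(1, h + 1)]
-- ===== Notes on version B (the rewrite author's own statement) =====
-- stated objective: simpler
-- what changed: Replaces the per-cell conditional inner loop with direct arithmetic segment construction: each row is built as pad spaces + (2y-1) hashes + pad spaces via list repetition.
import Mathlib
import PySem

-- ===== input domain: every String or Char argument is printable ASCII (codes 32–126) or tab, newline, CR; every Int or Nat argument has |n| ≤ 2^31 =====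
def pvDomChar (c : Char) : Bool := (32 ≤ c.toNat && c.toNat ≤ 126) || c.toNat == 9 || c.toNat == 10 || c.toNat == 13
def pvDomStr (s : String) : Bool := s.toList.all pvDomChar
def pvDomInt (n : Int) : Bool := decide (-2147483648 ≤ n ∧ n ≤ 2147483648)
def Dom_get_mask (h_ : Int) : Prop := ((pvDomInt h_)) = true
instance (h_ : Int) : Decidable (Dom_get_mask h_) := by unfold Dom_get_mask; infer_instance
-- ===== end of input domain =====

-- B builds each row from arithmetic segment lengths (pad/fill/pad) instead of testing a predicate per cell; objective: simpler.

-- ===== PORT A =====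
def get_mask (h_ : Int) : List (List String) :=
  (PySem.List.pyRange 1 (h_ + 1) 1).foldl (fun meh y =>
    let tiles := 2 * y - 1
    let padding := PySem.Int.floordiv (2 * h_ - 1 - tiles) 2
    let leh := (PySem.List.pyRange 1 (2 * h_) 1).foldl (fun leh x =>
      leh ++ [if padding < x ∧ x < 2 * h_ - padding then "#" else " "]) []
    meh ++ [leh]) []

-- ===== PORT B =====
def get_mask_alt (h_ : Int) : List (List String) :=
  (PySem.List.pyRange 1 (h_ + 1) 1).map (fun y =>
    List.replicate (h_ - y).toNat " " ++ List.replicate (2 * y - 1).toNat "#"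
      ++ List.replicate (h_ - y).toNat " ")

-- ===== PRECONDITION & SPEC =====
def Spec_get_mask (h_ : Int) (out : List (List String)) : Prop := out = get_mask_alt h_
instance (h_ : Int) (out : List (List String)) : Decidable (Spec_get_mask h_ out) := by unfold Spec_get_mask; infer_instance

-- ===== CLAIM (what is proved, stated in full; the proofs are below) =====
def Claim_equal_get_mask : Prop := ∀ (h_ : Int), Dom_get_mask h_ → Spec_get_mask h_ (get_mask h_)

-- ===== LEMMAS AND PROOFS =====

-- a range mapped through a function constant on it is a replicate
theorem map_pyRange_const (a b : Int) (f : Int → String) (c : String)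
    (hc : ∀ x, a ≤ x → x < b → f x = c) :
    (PySem.List.pyRange a b 1).map f = List.replicate (b - a).toNat c := by
  rw [PySem.List.pyRange_one, List.map_map]
  have : ∀ i ∈ List.range (b - a).toNat, (f ∘ fun k : Nat => a + k) i = c := by
    intro i hi
    simp only [List.mem_range] at hi
    show f (a + i) = c
    exact hc _ (by omega) (by omega)
  rw [List.map_congr_left this, List.map_const', List.length_range]

theorem row_eq (h_ y : Int) (hy1 : 1 ≤ y) (hy2 : y ≤ h_) :
    (PySem.List.pyRange 1 (2 * h_) 1).map
      (fun x => if h_ - y < x ∧ x < 2 * h_ - (h_ - y) then "#" else " ")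
    = List.replicate (h_ - y).toNat " " ++ List.replicate (2 * y - 1).toNat "#"
      ++ List.replicate (h_ - y).toNat " " := by
  rw [PySem.List.pyRange_one_append 1 (h_ - y + 1) (2 * h_) (by omega) (by omega),
      PySem.List.pyRange_one_append (h_ - y + 1) (h_ + y) (2 * h_) (by omega) (by omega)]
  rw [List.map_append, List.map_append]
  rw [map_pyRange_const _ _ _ " " (by intro x hx1 hx2; rw [if_neg]; omega),
      map_pyRange_const _ _ _ "#" (by intro x hx1 hx2; rw [if_pos]; omega),
      map_pyRange_const _ _ _ " " (by intro x hx1 hx2; rw [if_neg]; omega)]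
  have e1 : (h_ - y + 1 - 1).toNat = (h_ - y).toNat := by omega
  have e2 : (h_ + y - (h_ - y + 1)).toNat = (2 * y - 1).toNat := by omega
  have e3 : (2 * h_ - (h_ + y)).toNat = (h_ - y).toNat := by omega
  rw [e1, e2, e3, List.append_assoc]

-- ===== VERDICT (by name: the statement is the Claim_ definition above) =====
theorem get_mask_spec : Claim_equal_get_mask := by
  intro h_ _
  unfold Spec_get_mask get_mask get_mask_alt
  simp only
  rw [PySem.List.foldl_append_singleton_eq_map, List.nil_append]
  apply List.map_congr_left
  intro y hy
  rw [PySem.List.mem_pyRange_one] at hy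
  rw [PySem.List.foldl_append_singleton_eq_map, List.nil_append]
  have hpad : PySem.Int.floordiv (2 * h_ - 1 - (2 * y - 1)) 2 = h_ - y := by
    rw [PySem.Int.floordiv_eq_ediv_of_pos (by omega)]; omega
  rw [hpad]
  exact row_eq h_ y (by omega) (by omega)
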